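-- pv_equiv track=rewrite | github.com/Futrell/cliqs | readcorpora.py | sentence_lines
-- ===== SOURCE A (Python) =====
-- def sentence_lines(lines):
--     """ [CoNLL line] -> [([CoNLL line], Int, Int)] """
--     start_line = 0
--     sentence_lines = []
--     for i, line in enumerate(lines, 1):
--         line = line.strip()
--         if line:
--             sentence_lines.append(line)
--         else:
--             if sentence_lines:
--                 end_line = i
--                 yield sentence_lines, start_line, end_line
--             sentence_lines = []
--             start_line = i + 1
--     if sentence_lines:
--         end_line = i
--         yield sentence_lines, start_line, end_line
-- ===== SOURCE B (Python) =====
-- def _runs(pairs):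
--     """Split a list of (line number, text) pairs into maximal runs of
--     consecutive pairs sharing the same truthiness of text.
--     Returns [(is_content, [(line number, text)])]."""
--     runs = []
--     i = 0
--     while i < len(pairs):
--         key = bool(pairs[i][1])
--         j = i + 1
--         while j < len(pairs) and bool(pairs[j][1]) == key:
--             j += 1
--         runs.append((key, pairs[i:j]))
--         i = j
--     return runs
--
--
-- def sentence_lines(lines):
--     """ [CoNLL line] -> [([CoNLL line], Int, Int)] """
--     numbered = list(enumerate((line.strip() for line in lines), 1))
--     runs = _runs(numbered)
--     prev_blank = -1  # line number of the most recent blank line (none yet)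
--     for k, (is_content, grp) in enumerate(runs):
--         if is_content:
--             # a sentence ends at the blank line separating it from the next
--             # run, or at its own last line when the input ends
--             end = runs[k + 1][1][0][0] if k + 1 < len(runs) else grp[-1][0]
--             yield [text for _, text in grp], prev_blank + 1, end
--         else:
--             prev_blank = grp[-1][0]
-- ===== Notes on version B (the rewrite author's own statement) =====
-- stated objective: alternative
-- what changed: B is two-phase: it splits the numbered stripped lines into maximal content/blank runs and then emits each content run with a one-run lookahead (end = first line of the following blank run, or the run's last line at end of input) and a prev_blank accumulator for the start line, instead of A's single line-by-line pass threading an accumulator and start_line state.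
import Mathlib
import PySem

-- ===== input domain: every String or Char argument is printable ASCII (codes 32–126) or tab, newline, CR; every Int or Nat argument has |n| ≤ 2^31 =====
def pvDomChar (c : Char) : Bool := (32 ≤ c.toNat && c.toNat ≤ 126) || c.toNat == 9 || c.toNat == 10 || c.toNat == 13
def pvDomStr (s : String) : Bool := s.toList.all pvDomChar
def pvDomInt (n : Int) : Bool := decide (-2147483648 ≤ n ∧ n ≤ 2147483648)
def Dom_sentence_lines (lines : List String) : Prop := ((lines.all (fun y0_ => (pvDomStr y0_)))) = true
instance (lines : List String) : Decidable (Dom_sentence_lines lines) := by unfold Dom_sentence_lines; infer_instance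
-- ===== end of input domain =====

-- B groups the numbered stripped lines into maximal content/blank runs and emits each content run
-- with a one-run lookahead, instead of A's line-by-line accumulator (alternative decomposition,
-- same cost); A and B are generators, compared as the list of yielded values.

-- ===== PORT A =====
-- enumerate(lines, 1)
def pvEnumFrom (k : Nat) : List String → List (Nat × String)
  | [] => []
  | x :: xs => (k, x) :: pvEnumFrom (k + 1) xs

-- A's for-loop: state = (start_line, accumulated stripped lines); after the loop the
-- final flush uses i = len(lines) = n (passed in; cur ≠ [] implies the loop ran, so i = n).
def pvAGo (n : Nat) : List (Nat × String) → Int → List String → List (List String × Int × Int)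
  | [], start, cur => if cur = [] then [] else [(cur, start, (n : Int))]
  | (i, line) :: rest, start, cur =>
    let l := PySem.Str.strip line
    if l ≠ "" then
      pvAGo n rest start (cur ++ [l])
    else
      (if cur = [] then [] else [(cur, start, (i : Int))]) ++ pvAGo n rest ((i : Int) + 1) []

def sentence_lines (lines : List String) : List (List String × Int × Int) :=
  pvAGo lines.length (pvEnumFrom 1 lines) 0 []

-- ===== PORT B =====
-- numbered = list(enumerate((line.strip() for line in lines), 1))
def pvBNum (k : Nat) : List String → List (Nat × String)
  | [] => []
  | l :: ls => (k, PySem.Str.strip l) :: pvBNum (k + 1) ls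

-- _runs: split into maximal runs of pairs sharing the truthiness of the text
-- (outer while pops one run per step: the inner while counts k = 1 + matching prefix of the tail)
def pvRuns : List (Nat × String) → List (Bool × List (Nat × String))
  | [] => []
  | p :: ps =>
    let key := !(p.2 == "")
    let run := ps.takeWhile (fun q => (!(q.2 == "")) == key)
    (key, p :: run) :: pvRuns (ps.drop run.length)
  termination_by l => l.length
  decreasing_by simp

-- B's emission loop over the runs; runs[k+1] is the head of the remaining runs list.
-- Runs are nonempty by construction, so the (0, "") defaults of headD/getLastD are unreachable.
def pvBEmit : Int → List (Bool × List (Nat × String)) → List (List String × Int × Int)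
  | _, [] => []
  | prev, (key, grp) :: rest =>
    if key then
      (grp.map Prod.snd, prev + 1,
        match rest with
        | (_, g2) :: _ => ((g2.headD (0, "")).1 : Int)
        | [] => ((grp.getLastD (0, "")).1 : Int))
      :: pvBEmit prev rest
    else pvBEmit ((grp.getLastD (0, "")).1 : Int) rest

def sentence_lines_alt (lines : List String) : List (List String × Int × Int) :=
  pvBEmit (-1) (pvRuns (pvBNum 1 lines))

-- ===== PRECONDITION & SPEC =====
def Spec_sentence_lines (lines : List String) (out : List (List String × Int × Int)) : Prop := out = sentence_lines_alt lines
instance (lines : List String) (out : List (List String × Int × Int)) : Decidable (Spec_sentence_lines lines out) := by unfold Spec_sentence_lines; infer_instance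

-- ===== CLAIM (what is proved, stated in full; the proofs are below) =====
def Claim_equal_sentence_lines : Prop := ∀ (lines : List String), Dom_sentence_lines lines → Spec_sentence_lines lines (sentence_lines lines)

-- ===== LEMMAS AND PROOFS =====

-- Python truthiness of line.strip(): the stripped line is non-empty
def pvContent (s : String) : Bool := PySem.Str.strip s ≠ ""

theorem pvBNum_length (t : List String) : ∀ k, (pvBNum k t).length = t.length := by
  induction t with
  | nil => intro k; rfl
  | cons x xs ih => intro k; simp [pvBNum, ih]

theorem pvBNum_takeWhile_content (t : List String) :
    ∀ k, (pvBNum k t).takeWhile (fun q => !(q.2 == "")) = pvBNum k (t.takeWhile pvContent) := by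
  induction t with
  | nil => intro k; rfl
  | cons x xs ih =>
    intro k
    by_cases h : PySem.Str.strip x = "" <;> simp [pvBNum, pvContent, h, ih]

theorem pvBNum_takeWhile_blank (t : List String) :
    ∀ k, (pvBNum k t).takeWhile (fun q => q.2 == "") =
      pvBNum k (t.takeWhile (fun s => PySem.Str.strip s == "")) := by
  induction t with
  | nil => intro k; rfl
  | cons x xs ih =>
    intro k
    by_cases h : PySem.Str.strip x = "" <;> simp [pvBNum, h, ih]

theorem pvBNum_drop (t : List String) : ∀ k m, (pvBNum k t).drop m = pvBNum (k + m) (t.drop m) := by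
  induction t with
  | nil => intro k m; simp [pvBNum]
  | cons x xs ih =>
    intro k m
    cases m with
    | zero => simp [pvBNum]
    | succ m' =>
      simp only [pvBNum, List.drop_succ_cons, ih (k + 1) m']
      rw [show k + 1 + m' = k + (m' + 1) from by omega]

theorem pvBNum_map_snd (t : List String) : ∀ k, (pvBNum k t).map Prod.snd = t.map PySem.Str.strip := by
  induction t with
  | nil => intro k; rfl
  | cons x xs ih => intro k; simp [pvBNum, ih]

theorem pvBNum_getLastD_fst (t : List String) :
    ∀ k d, t ≠ [] → ((pvBNum k t).getLastD d).1 = k + t.length - 1 := by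
  induction t with
  | nil => intro k d h; exact absurd rfl h
  | cons x xs ih =>
    intro k d _
    cases xs with
    | nil => simp [pvBNum]
    | cons y ys =>
      have := ih (k + 1) (k, PySem.Str.strip x) (by simp)
      simp only [pvBNum, List.getLastD_cons] at this ⊢
      rw [this]
      simp; omega

theorem pvRuns_nil : pvRuns [] = [] := by rw [pvRuns]

theorem pvRuns_cons (p : Nat × String) (ps : List (Nat × String)) :
    pvRuns (p :: ps) =
      (!(p.2 == ""), p :: ps.takeWhile (fun q => (!(q.2 == "")) == !(p.2 == "")))
        :: pvRuns (ps.drop (ps.takeWhile (fun q => (!(q.2 == "")) == !(p.2 == ""))).length) := by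
  rw [pvRuns]

theorem pvDrop_takeWhile_head (t : List String) (y : String) (t' : List String)
    (h : t.drop (t.takeWhile pvContent).length = y :: t') : PySem.Str.strip y = "" := by
  have hd : t.drop (t.takeWhile pvContent).length = t.dropWhile pvContent := by
    clear h
    induction t with
    | nil => rfl
    | cons x xs ih => by_cases hx : pvContent x <;> simp [hx, ih]
  rw [hd] at h
  have := List.head?_dropWhile_not pvContent t
  rw [h] at this
  simpa [pvContent] using this

-- a leading blank run is absorbed: emitting it just records its last line number
theorem pvAbsorb (t : List String) (k : Nat) (q : Int) :
    pvBEmit q (pvRuns ((k, "") :: pvBNum (k + 1) t)) = pvBEmit (k : Int) (pvRuns (pvBNum (k + 1) t)) := by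
  rw [pvRuns_cons]
  have hpred : (fun q : Nat × String => (!(q.2 == "")) == !((("" : String)) == "")) =
      (fun q : Nat × String => q.2 == "") := by
    funext r; cases h : r.2 == "" <;> simp
  rw [hpred, pvBNum_takeWhile_blank]
  have hk : (!((("" : String)) == "")) = false := by simp
  rw [hk]
  set tb := t.takeWhile (fun s => PySem.Str.strip s == "") with htb
  simp only [pvBEmit, Bool.false_eq_true, if_false]
  rw [pvBNum_length, pvBNum_drop]
  have hcons : ((k, ("" : String)) :: pvBNum (k + 1) tb) = pvBNum k ("" :: tb) := by
    simp [pvBNum, PySem.Str.strip]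
    decide
  cases htbe : tb with
  | nil =>
    simp [pvBNum, List.getLastD]
  | cons b bs =>
    have hlast : (((k, ("" : String)) :: pvBNum (k + 1) tb).getLastD (0, "")).1 = k + tb.length := by
      rw [hcons, pvBNum_getLastD_fst ("" :: tb) k _ (by simp)]
      simp
    rw [← htbe, hlast]
    -- right side: its first run is the (nonempty) rest of the blank run
    have htb2 : t.takeWhile (fun s => PySem.Str.strip s == "") = b :: bs := by
      rw [← htb]; exact htbe
    have hb : PySem.Str.strip b = "" := by
      have hmem : b ∈ t.takeWhile (fun s => PySem.Str.strip s == "") := by rw [htb2]; simp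
      have := List.mem_takeWhile_imp hmem
      simpa using this
    obtain ⟨t', ht'⟩ : ∃ t', t = b :: t' := by
      cases t with
      | nil => simp at htb2
      | cons u us =>
        rw [List.takeWhile_cons] at htb2
        by_cases hu : PySem.Str.strip u = ""
        · simp [hu] at htb2; exact ⟨us, by rw [htb2.1]⟩
        · simp [hu] at htb2
    subst ht'
    have hbs : t'.takeWhile (fun s => PySem.Str.strip s == "") = bs := by
      rw [List.takeWhile_cons] at htb2; simp [hb] at htb2; exact htb2
    -- unfold the RHS one run
    simp only [pvBNum]
    rw [pvRuns_cons]
    have hpred2 : (fun q : Nat × String => (!(q.2 == "")) == !((PySem.Str.strip b) == "")) =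
        (fun q : Nat × String => q.2 == "") := by
      funext r; cases h : r.2 == "" <;> simp [hb]
    rw [hpred2, pvBNum_takeWhile_blank, hbs]
    have hkb : (!((PySem.Str.strip b) == "")) = false := by simp [hb]
    rw [hkb]
    simp only [pvBEmit, Bool.false_eq_true, if_false]
    rw [pvBNum_length, pvBNum_drop]
    have hlast2 : (((k + 1, PySem.Str.strip b) :: pvBNum (k + 1 + 1) bs).getLastD (0, "")).1
        = k + tb.length := by
      have : ((k + 1, PySem.Str.strip b) :: pvBNum (k + 1 + 1) bs) = pvBNum (k + 1) (b :: bs) := by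
        simp [pvBNum]
      rw [this, pvBNum_getLastD_fst (b :: bs) (k + 1) _ (by simp), htbe]
      simp; omega
    rw [hlast2]
    rw [htbe]
    simp only [List.length_cons, List.drop_succ_cons]
    rw [show k + 1 + (bs.length + 1) = k + 1 + 1 + bs.length from by omega]

theorem pvMain (m : Nat) : ∀ (rest : List String) (n i : Nat), rest.length ≤ m → i + rest.length = n →
    ((∀ (start q : Int) (cur : List String), cur ≠ [] →
        pvAGo n (pvEnumFrom (i + 1) rest) start cur =
          (cur ++ (rest.takeWhile pvContent).map PySem.Str.strip,
           start,
           if i + (rest.takeWhile pvContent).length = n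
             then ((i + (rest.takeWhile pvContent).length : Nat) : Int)
             else ((i + (rest.takeWhile pvContent).length : Nat) : Int) + 1)
          :: pvBEmit q (pvRuns (pvBNum (i + 1 + (rest.takeWhile pvContent).length)
               (rest.drop (rest.takeWhile pvContent).length))))
     ∧ (∀ prev : Int,
        pvAGo n (pvEnumFrom (i + 1) rest) (prev + 1) [] = pvBEmit prev (pvRuns (pvBNum (i + 1) rest)))) := by
  induction m with
  | zero =>
    intro rest n i hlen hn
    have hrest : rest = [] := by cases rest with
      | nil => rfl
      | cons a b => simp at hlen
    subst hrest
    constructor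
    · intro start q cur hcne
      have hin : i = n := by simpa using hn
      simp [pvEnumFrom, pvAGo, hcne, pvBNum, pvRuns, pvBEmit, hin]
    · intro prev
      simp [pvEnumFrom, pvAGo, pvBNum, pvRuns, pvBEmit]
  | succ m ih =>
    intro rest n i hlen hn
    match rest with
    | [] =>
      constructor
      · intro start q cur hcne
        have hin : i = n := by simpa using hn
        simp [pvEnumFrom, pvAGo, hcne, pvBNum, pvRuns, pvBEmit, hin]
      · intro prev
        simp [pvEnumFrom, pvAGo, pvBNum, pvRuns, pvBEmit]
    | x :: t =>
      have hlt : t.length ≤ m := by simp at hlen; omega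
      have hnt : (i + 1) + t.length = n := by simp at hn; omega
      have h1 : ∀ (start q : Int) (cur : List String), cur ≠ [] →
          pvAGo n (pvEnumFrom (i + 1) (x :: t)) start cur =
            (cur ++ ((x :: t).takeWhile pvContent).map PySem.Str.strip,
             start,
             if i + ((x :: t).takeWhile pvContent).length = n
               then ((i + ((x :: t).takeWhile pvContent).length : Nat) : Int)
               else ((i + ((x :: t).takeWhile pvContent).length : Nat) : Int) + 1)
            :: pvBEmit q (pvRuns (pvBNum (i + 1 + ((x :: t).takeWhile pvContent).length)
                 ((x :: t).drop ((x :: t).takeWhile pvContent).length))) := by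
        intro start q cur hcne
        by_cases hx : PySem.Str.strip x = ""
        · -- blank head: A flushes cur here; the whole remaining list is B's next runs
          have hpc : pvContent x = false := by simp [pvContent, hx]
          have htw : (x :: t).takeWhile pvContent = [] := by simp [hpc]
          rw [htw]
          simp only [List.map_nil, List.length_nil, List.append_nil, Nat.add_zero, List.drop_zero]
          have hstep := (ih t n (i + 1) hlt hnt).2 ((i + 1 : Nat) : Int)
          have habs : pvBEmit q (pvRuns (pvBNum (i + 1) (x :: t)))
              = pvBEmit ((i + 1 : Nat) : Int) (pvRuns (pvBNum (i + 1 + 1) t)) := by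
            have hb2 : pvBNum (i + 1) (x :: t) = (i + 1, "") :: pvBNum (i + 1 + 1) t := by
              simp [pvBNum, hx]
            rw [hb2, pvAbsorb]
          have hin : i ≠ n := by omega
          have lhs_eq : pvAGo n (pvEnumFrom (i + 1) (x :: t)) start cur
              = (cur, start, ((i + 1 : Nat) : Int))
                :: pvAGo n (pvEnumFrom (i + 1 + 1) t) (((i + 1 : Nat) : Int) + 1) [] := by
            simp [pvEnumFrom, pvAGo, hx, hcne]
          rw [lhs_eq, hstep, habs, if_neg hin]
          push_cast
          rfl
        · -- content head: A appends strip x and continues inside the run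
          have hpc : pvContent x = true := by simp [pvContent, hx]
          have htw : (x :: t).takeWhile pvContent = x :: t.takeWhile pvContent := by simp [hpc]
          rw [htw]
          have hstep := (ih t n (i + 1) hlt hnt).1 start q (cur ++ [PySem.Str.strip x]) (by simp)
          simp only [pvEnumFrom, pvAGo]
          rw [if_pos (by simpa using hx)]
          rw [hstep]
          simp only [List.map_cons, List.length_cons, List.drop_succ_cons, List.append_assoc,
            List.cons_append, List.nil_append]
          rw [show i + ((t.takeWhile pvContent).length + 1) = i + 1 + (t.takeWhile pvContent).length from by omega]
          rw [show i + 1 + ((t.takeWhile pvContent).length + 1) = i + 1 + 1 + (t.takeWhile pvContent).length from by omega]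
      refine ⟨h1, ?_⟩
      intro prev
      by_cases hx : PySem.Str.strip x = ""
      · -- blank head, empty accumulator: both sides skip the line
        have hstep := (ih t n (i + 1) hlt hnt).2 ((i + 1 : Nat) : Int)
        have habs : pvBEmit prev (pvRuns (pvBNum (i + 1) (x :: t)))
            = pvBEmit ((i + 1 : Nat) : Int) (pvRuns (pvBNum (i + 1 + 1) t)) := by
          have hb2 : pvBNum (i + 1) (x :: t) = (i + 1, "") :: pvBNum (i + 1 + 1) t := by
            simp [pvBNum, hx]
          rw [hb2, pvAbsorb]
        have lhs_eq : pvAGo n (pvEnumFrom (i + 1) (x :: t)) (prev + 1) []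
            = pvAGo n (pvEnumFrom (i + 1 + 1) t) (((i + 1 : Nat) : Int) + 1) [] := by
          simp [pvEnumFrom, pvAGo, hx]
        rw [lhs_eq, hstep, habs]
      · -- content head: A starts a run; B's first run is exactly this content run
        have hpc : pvContent x = true := by simp [pvContent, hx]
        simp only [pvEnumFrom, pvAGo]
        rw [if_pos (by simpa using hx)]
        have hP1 := (ih t n (i + 1) hlt hnt).1 (prev + 1) prev [PySem.Str.strip x] (by simp)
        simp only [List.nil_append]
        rw [hP1]
        -- now compute B's side
        have hbn : pvBNum (i + 1) (x :: t) = (i + 1, PySem.Str.strip x) :: pvBNum (i + 1 + 1) t := by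
          simp [pvBNum]
        rw [hbn, pvRuns_cons]
        have hkey : (!((PySem.Str.strip x) == "")) = true := by simp [hx]
        rw [hkey]
        have hpred : (fun q : Nat × String => (!(q.2 == "")) == true) =
            (fun q : Nat × String => !(q.2 == "")) := by
          funext r; cases h : r.2 == "" <;> simp
        rw [hpred, pvBNum_takeWhile_content, pvBNum_length, pvBNum_drop]
        simp only [pvBEmit, reduceIte]
        have hmap : ((i + 1, PySem.Str.strip x) :: pvBNum (i + 1 + 1) (t.takeWhile pvContent)).map Prod.snd
            = PySem.Str.strip x :: (t.takeWhile pvContent).map PySem.Str.strip := by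
          simp [pvBNum_map_snd]
        cases hdrop : t.drop (t.takeWhile pvContent).length with
        | nil =>
          -- the run reaches the end of the input
          have hLn : (t.takeWhile pvContent).length = t.length := by
            have hle : (t.takeWhile pvContent).length ≤ t.length := (t.takeWhile_sublist _).length_le
            have := congrArg List.length hdrop
            simp at this
            omega
          have hend : i + 1 + (t.takeWhile pvContent).length = n := by omega
          simp only [pvBNum, pvRuns_nil]
          rw [if_pos hend]
          have hlast : (((i + 1, PySem.Str.strip x) :: pvBNum (i + 1 + 1) (t.takeWhile pvContent)).getLastD (0, "")).1
              = i + 1 + (t.takeWhile pvContent).length := by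
            have hc : ((i + 1, PySem.Str.strip x) :: pvBNum (i + 1 + 1) (t.takeWhile pvContent))
                = pvBNum (i + 1) (x :: t.takeWhile pvContent) := by simp [pvBNum]
            rw [hc, pvBNum_getLastD_fst _ (i + 1) _ (by simp)]
            simp only [List.length_cons]
            omega
          rw [hlast, hmap]
          simp
        | cons y t'' =>
          -- a blank line follows the run
          have hy : PySem.Str.strip y = "" := pvDrop_takeWhile_head t y t'' hdrop
          have hlt2 : (t.takeWhile pvContent).length < t.length := by
            have := congrArg List.length hdrop
            simp at this
            omega
          have hend : ¬ (i + 1 + (t.takeWhile pvContent).length = n) := by omega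
          rw [if_neg hend]
          simp only [pvBNum]
          rw [pvRuns_cons]
          simp only [pvBEmit, List.headD_cons]
          rw [hmap]
          apply congrArg₂ (· :: ·)
          · simp only [Prod.mk.injEq]
            push_cast
            simp
            ring
          · rfl

-- ===== VERDICT (by name: the statement is the Claim_ definition above) =====
theorem sentence_lines_spec : Claim_equal_sentence_lines := by
  intro lines _
  unfold Spec_sentence_lines sentence_lines sentence_lines_alt
  have h := (pvMain lines.length lines lines.length 0 le_rfl (by simp)).2 (-1)
  simpa using h
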